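-- pv_equiv track=rewrite | github.com/gjwlsdnd224/projects | jher3-238_PA4.py | any_adjacent_vertebrates
-- ===== SOURCE A (Python) =====
-- def any_adjacent_vertebrates(animals, vertebrates):
-- 	real_vert = False
-- 	for i in range(len(animals)-1):
-- 		for j in range(len(vertebrates)):
-- 			if(animals[i] == vertebrates[j]):#if vertebrate is an animal then set real_vert to true
-- 				real_vert = True
-- 				break
-- 		if(real_vert == True):
-- 			real_vert = False
-- 			for j in range(len(vertebrates)):
-- 				if(animals[i+1] == vertebrates[j]):
-- 					return True
-- 	return False
-- ===== SOURCE B (Python) =====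
-- def any_adjacent_vertebrates(animals, vertebrates):
--     flags = [a in vertebrates for a in animals]
--     return any(flags[i] and flags[i + 1] for i in range(len(flags) - 1))
-- ===== Notes on version B (the rewrite author's own statement) =====
-- stated objective: simpler
-- what changed: B precomputes a boolean membership table in one pass over animals and then scans adjacent flag pairs with any(), replacing A's interleaved nested index loops with mutable state and early returns.
import Mathlib
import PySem

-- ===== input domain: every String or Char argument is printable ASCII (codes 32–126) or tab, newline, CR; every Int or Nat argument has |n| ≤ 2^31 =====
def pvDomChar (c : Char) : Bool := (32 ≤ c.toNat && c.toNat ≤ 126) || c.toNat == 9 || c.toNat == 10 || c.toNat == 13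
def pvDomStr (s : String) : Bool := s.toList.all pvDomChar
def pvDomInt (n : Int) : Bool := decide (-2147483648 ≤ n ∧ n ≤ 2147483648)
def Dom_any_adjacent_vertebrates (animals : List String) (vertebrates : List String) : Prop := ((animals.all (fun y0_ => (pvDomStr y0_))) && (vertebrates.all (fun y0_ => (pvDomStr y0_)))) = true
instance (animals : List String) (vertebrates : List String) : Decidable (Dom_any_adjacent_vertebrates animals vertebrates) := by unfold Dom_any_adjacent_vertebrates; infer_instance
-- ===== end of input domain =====

-- B replaces A's interleaved nested index loops (mutable flag, break, early return)
-- with a one-pass membership table followed by an any() scan over adjacent flag pairs (simpler decomposition).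


-- ===== PORT A =====
-- inner 'for j in range(len(vertebrates)): if x == vertebrates[j]: …; break' — scans vs in order, stops at first match
def pvAScan (x : String) (vs : List String) : Bool :=
  match vs with
  | [] => false
  | v :: rest => if x == v then true else pvAScan x rest

-- outer 'for i in range(len(animals)-1)' with the mutable real_vert flag and the early 'return True'
def pvALoop (animals vs : List String) (i stop : Nat) : Bool :=
  if _h : i < stop then
    -- first inner loop sets real_vert (reset to False before the second inner loop)
    if pvAScan (animals.getD i "") vs then
      -- second inner loop: 'return True' at the first match, else fall through to next i
      if pvAScan (animals.getD (i + 1) "") vs then true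
      else pvALoop animals vs (i + 1) stop
    else pvALoop animals vs (i + 1) stop
  else false
termination_by stop - i

def any_adjacent_vertebrates (animals : List String) (vertebrates : List String) : Bool :=
  pvALoop animals vertebrates 0 (animals.length - 1)

-- ===== PORT B =====
def any_adjacent_vertebrates_alt (animals : List String) (vertebrates : List String) : Bool :=
  let flags := animals.map (fun a => vertebrates.contains a)
  (List.range (flags.length - 1)).any (fun i => flags.getD i false && flags.getD (i + 1) false)

-- ===== PRECONDITION & SPEC =====
def Spec_any_adjacent_vertebrates (animals : List String) (vertebrates : List String) (out : Bool) : Prop := out = any_adjacent_vertebrates_alt animals vertebrates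
instance (animals : List String) (vertebrates : List String) (out : Bool) : Decidable (Spec_any_adjacent_vertebrates animals vertebrates out) := by unfold Spec_any_adjacent_vertebrates; infer_instance

-- ===== CLAIM (what is proved, stated in full; the proofs are below) =====
def Claim_equal_any_adjacent_vertebrates : Prop := ∀ (animals : List String) (vertebrates : List String), Dom_any_adjacent_vertebrates animals vertebrates → Spec_any_adjacent_vertebrates animals vertebrates (any_adjacent_vertebrates animals vertebrates)

-- ===== LEMMAS AND PROOFS =====

-- A's inner linear scan is list membership
theorem pvAScan_eq_contains (x : String) (vs : List String) : pvAScan x vs = vs.contains x := by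
  induction vs with
  | nil => rfl
  | cons v rest ih =>
      simp [pvAScan, ih]

-- A's outer loop from i to stop equals an any-scan of adjacent membership flags over that index range
theorem pvALoop_eq_any (animals vs : List String) (stop : Nat) :
    ∀ i, pvALoop animals vs i stop =
      ((List.range stop).drop i).any
        (fun k => vs.contains (animals.getD k "") && vs.contains (animals.getD (k + 1) "")) := by
  intro i
  fun_induction pvALoop animals vs i stop with
  | case1 i h h1 h2 =>
      rw [List.drop_eq_getElem_cons (by simpa using h)]
      simp [pvAScan_eq_contains] at h1 h2
      simp [List.any_cons, h1, h2]
  | case2 i h h1 h2 ih =>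
      rw [List.drop_eq_getElem_cons (by simpa using h), ih]
      simp [pvAScan_eq_contains] at h1 h2
      simp [List.any_cons, h1, h2]
  | case3 i h h1 ih =>
      rw [List.drop_eq_getElem_cons (by simpa using h), ih]
      simp [pvAScan_eq_contains] at h1
      simp [List.any_cons, h1]
  | case4 i h =>
      rw [List.drop_of_length_le (by simpa using h)]
      rfl

theorem flags_getD (animals vs : List String) (k : Nat) (hk : k < animals.length) :
    (animals.map (fun a => vs.contains a)).getD k false = vs.contains (animals.getD k "") := by
  simp [List.getD_eq_getElem?_getD, List.getElem?_map, List.getElem?_eq_getElem hk]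

-- congruence of List.any under pointwise agreement on members (membership-relative form)
theorem pv_any_congr {α : Type} (p q : α → Bool) : ∀ l : List α, (∀ a ∈ l, p a = q a) → l.any p = l.any q := by
  intro l h
  induction l with
  | nil => rfl
  | cons a rest ih => simp_all [List.any_cons]

-- ===== VERDICT (by name: the statement is the Claim_ definition above) =====
theorem any_adjacent_vertebrates_spec : Claim_equal_any_adjacent_vertebrates := by
  intro animals vs _
  unfold Spec_any_adjacent_vertebrates any_adjacent_vertebrates any_adjacent_vertebrates_alt
  rw [pvALoop_eq_any]
  simp only [List.drop_zero, List.length_map]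
  apply pv_any_congr
  intro k hk
  simp only [List.mem_range] at hk
  have hk1 : k < animals.length := lt_of_lt_of_le hk (Nat.sub_le _ _)
  have hk2 : k + 1 < animals.length := by omega
  rw [flags_getD animals vs k hk1, flags_getD animals vs (k + 1) hk2]
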